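-- pv_equiv track=rewrite | github.com/NedorezovNS/PyPro_Task6 | modules/app.py | courses_duration
-- ===== SOURCE A (Python) =====
-- def courses_duration(courses, durations):
--     courses_list = []
--     ready_dict = {}
--     for course, duration in zip(courses, durations):
--         course_dict = {"title": course, "duration": duration}
--         courses_list.append(course_dict)
--     durations_dict = {}
--     for ids, b in enumerate(courses_list):
--         key = b['duration']
--         durations_dict.setdefault(key, [])
--         durations_dict[key].append(ids)
--     durations_dict = dict(sorted(durations_dict.items()))
--     for a, b in durations_dict.items():
--         month = a
--         for deep in b:
--             course_id = deep
--             name = courses_list[course_id]['title']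
--             ready_dict.setdefault(name, None)
--             ready_dict[name] = month
--     return ready_dict
-- ===== SOURCE B (Python) =====
-- def courses_duration(courses, durations):
--     result = {}
--     for course, duration in sorted(zip(courses, durations), key=lambda p: p[1]):
--         result[course] = duration
--     return result
-- ===== Notes on version B (the rewrite author's own statement) =====
-- stated objective: simpler
-- what changed: B drops A's intermediate list-of-dicts and its duration->list-of-indices grouping dict entirely: it stably sorts the zipped (course, duration) pairs by duration once and fills the result dict in a single pass, last write winning.
import Mathlib
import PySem

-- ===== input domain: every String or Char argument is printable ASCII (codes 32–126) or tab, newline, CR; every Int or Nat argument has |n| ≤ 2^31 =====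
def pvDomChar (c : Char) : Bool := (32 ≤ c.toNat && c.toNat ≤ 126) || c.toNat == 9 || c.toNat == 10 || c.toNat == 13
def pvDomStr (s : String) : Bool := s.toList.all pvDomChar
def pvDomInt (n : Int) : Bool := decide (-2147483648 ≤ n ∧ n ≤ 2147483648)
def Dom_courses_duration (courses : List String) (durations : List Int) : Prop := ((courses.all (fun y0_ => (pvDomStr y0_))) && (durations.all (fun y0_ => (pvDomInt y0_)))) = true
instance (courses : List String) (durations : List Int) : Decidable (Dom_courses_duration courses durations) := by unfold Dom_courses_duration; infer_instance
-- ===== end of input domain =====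

-- B replaces A's group-indices-into-a-dict-of-lists-then-flatten by a single stable sort of the
-- zipped (course, duration) pairs followed by one dict-filling pass (objective: simpler).


-- ===== PORT A =====
-- The per-course dict {"title": course, "duration": duration} has a fixed shape, ported as the
-- pair (title, duration).  'ready_dict.setdefault(name, None); ready_dict[name] = month' is ported
-- as a single insert (the None placeholder is overwritten immediately; insert appends a fresh key
-- and overwrites an existing one in place, exactly as the setdefault-then-assign pair does).
-- 'dict(sorted(durations_dict.items()))' compares (key, value) tuples, but the dict's keys are
-- distinct so the comparison never reaches the values: ported as a sort keyed on the key.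
def courses_duration (courses : List String) (durations : List Int) : List (String × Int) :=
  let courses_list := List.zip courses durations
  let durations_dict :=
    (PySem.List.enumerate courses_list).foldl
      (fun d p => (d.setdefault p.2.2 []).modify p.2.2 [] (fun l => l ++ [p.1]))
      PySem.Dict.empty
  let sorted_items := PySem.List.sorted durations_dict.items (fun p => p.1)
  let ready_dict :=
    sorted_items.foldl
      (fun rd q =>
        q.2.foldl
          (fun rd deep =>
            match PySem.List.pyGet? courses_list deep with
            | some b => rd.insert b.1 q.1
            | none => rd)  -- unreachable: every stored id indexes courses_list
          rd)
      PySem.Dict.empty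
  ready_dict.items

-- ===== PORT B =====
def courses_duration_alt (courses : List String) (durations : List Int) : List (String × Int) :=
  ((PySem.List.sorted (List.zip courses durations) (fun p => p.2)).foldl
      (fun result p => result.insert p.1 p.2) PySem.Dict.empty).items

-- ===== PRECONDITION & SPEC =====
def Spec_courses_duration (courses : List String) (durations : List Int) (out : List (String × Int)) : Prop := out = courses_duration_alt courses durations
instance (courses : List String) (durations : List Int) (out : List (String × Int)) : Decidable (Spec_courses_duration courses durations out) := by unfold Spec_courses_duration; infer_instance

-- ===== CLAIM (what is proved, stated in full; the proofs are below) =====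
def Claim_equal_courses_duration : Prop := ∀ (courses : List String) (durations : List Int), Dom_courses_duration courses durations → Spec_courses_duration courses durations (courses_duration courses durations)

-- ===== LEMMAS AND PROOFS =====

-- setdefault k [] followed by modify k [] f is just modify k [] f
theorem sd_modify {κ ν : Type} [BEq κ] [LawfulBEq κ] (d : PySem.Dict κ ν) (k : κ) (v0 : ν) (f : ν → ν) :
    (d.setdefault k v0).modify k v0 f = d.modify k v0 f := by
  by_cases hc : d.contains k = true
  · rw [PySem.Dict.setdefault_of_contains d v0 hc]
  · rw [PySem.Dict.setdefault_of_not_contains d v0 (by simpa using hc)]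
    show (d.insert k v0).insert k (f ((d.insert k v0).getD k v0)) = d.insert k (f (d.getD k v0))
    rw [PySem.Dict.getD_insert_self, PySem.Dict.insert_insert_self,
        PySem.Dict.getD_of_not_contains d v0 (by simpa using hc)]

-- every pair produced by enumerate indexes the list at its own position
theorem enum_get {α : Type} : ∀ (xs : List α) (s : Int) (p : Int × α),
    p ∈ PySem.List.enumerate xs s → ∃ n : Nat, p.1 = s + n ∧ xs[n]? = some p.2 := by
  intro xs
  induction xs with
  | nil => intro s p h; simp [PySem.List.enumerate] at h
  | cons x t ih =>
    intro s p h
    rw [show PySem.List.enumerate (x :: t) s = (s, x) :: PySem.List.enumerate t (s + 1) from rfl,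
        List.mem_cons] at h
    rcases h with h | h
    · exact ⟨0, by simp [h], by simp [h]⟩
    · obtain ⟨n, hn, hg⟩ := ih (s + 1) p h
      exact ⟨n + 1, by omega, by simpa using hg⟩

theorem enum_pyGet {α : Type} (xs : List α) (p : Int × α) (h : p ∈ PySem.List.enumerate xs 0) :
    PySem.List.pyGet? xs p.1 = some p.2 := by
  obtain ⟨n, hn, hg⟩ := enum_get xs 0 p h
  rw [show p.1 = ((n : Nat) : Int) by omega]
  simpa using hg

theorem enum_map_snd {α : Type} : ∀ (xs : List α) (s : Int),
    (PySem.List.enumerate xs s).map (·.2) = xs := by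
  intro xs
  induction xs with
  | nil => intro s; rfl
  | cons x t ih =>
    intro s
    rw [show PySem.List.enumerate (x :: t) s = (s, x) :: PySem.List.enumerate t (s + 1) from rfl]
    simp [ih]

theorem flatMap_congr_mem {α β : Type} : ∀ (l : List α) (f g : α → List β),
    (∀ a ∈ l, f a = g a) → l.flatMap f = l.flatMap g := by
  intro l
  induction l with
  | nil => intro f g _; rfl
  | cons x t ih =>
    intro f g h
    simp only [List.flatMap_cons, h x (by simp), ih f g (fun a ha => h a (by simp [ha]))]

-- nested fold over groups = fold over the flattened list
theorem foldl_foldl_flatMap {α β γ : Type} (f : γ → β → γ) (g : α → List β) :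
    ∀ (l : List α) (a : γ),
      l.foldl (fun acc x => (g x).foldl f acc) a = (l.flatMap g).foldl f a := by
  intro l
  induction l with
  | nil => intro a; rfl
  | cons x t ih => intro a; simp [List.foldl_append, ih]

theorem insertBy_append_left {α : Type} (bef : α → α → Bool) (x : α) :
    ∀ (l ys : List α), (∀ y ∈ l, bef x y = false) →
      PySem.List.insertBy bef x (l ++ ys) = l ++ PySem.List.insertBy bef x ys := by
  intro l
  induction l with
  | nil => intro ys _; rfl
  | cons z t ih =>
    intro ys h
    have hz : bef x z = false := h z (by simp)
    simp [PySem.List.insertBy, hz, ih ys (fun y hy => h y (by simp [hy]))]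

-- inserting z into strictly-key-sorted groups appends z to its own group
theorem insert_grouped : ∀ (ks : List Int) (g : Int → List (String × Int)) (z : String × Int),
    ks.Pairwise (· < ·) → z.2 ∈ ks → (∀ k ∈ ks, ∀ x ∈ g k, x.2 = k) →
    PySem.List.insertBy (fun a b => decide (a.2 < b.2)) z (ks.flatMap g)
      = ks.flatMap (fun k => g k ++ if z.2 = k then [z] else []) := by
  intro ks
  induction ks with
  | nil => intro g z _ hz _; simp at hz
  | cons k ks' ih =>
    intro g z hks hz hg
    rw [List.pairwise_cons] at hks
    by_cases hzk : z.2 = k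
    · -- z belongs to the head group: it passes g k and lands right after it
      have hnot : ∀ y ∈ g k, (decide (z.2 < y.2)) = false := by
        intro y hy
        have := hg k (by simp) y hy
        simp [this, hzk]
      rw [List.flatMap_cons, insertBy_append_left _ _ _ _ hnot]
      have htail : PySem.List.insertBy (fun a b => decide (a.2 < b.2)) z (ks'.flatMap g)
          = z :: ks'.flatMap g := by
        cases hm : ks'.flatMap g with
        | nil => simp [PySem.List.insertBy]
        | cons y t =>
          have hy : y ∈ ks'.flatMap g := by rw [hm]; simp
          obtain ⟨k', hk', hyk'⟩ := List.mem_flatMap.mp hy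
          have : z.2 < y.2 := by
            rw [hg k' (by simp [hk']) y hyk', hzk]; exact hks.1 k' hk'
          simp [PySem.List.insertBy, this]
      rw [htail, List.flatMap_cons]
      have hrest : ks'.flatMap (fun k => g k ++ if z.2 = k then [z] else []) = ks'.flatMap g := by
        apply flatMap_congr_mem
        intro k' hk'
        have : z.2 ≠ k' := by rw [hzk]; exact ne_of_lt (hks.1 k' hk')
        simp [this]
      rw [hrest]
      simp [hzk]
    · -- z belongs to a later group
      have hz' : z.2 ∈ ks' := by
        rw [List.mem_cons] at hz
        rcases hz with h | h
        · exact absurd h hzk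
        · exact h
      have hnot : ∀ y ∈ g k, (decide (z.2 < y.2)) = false := by
        intro y hy
        have hyk := hg k (by simp) y hy
        have : k < z.2 := hks.1 z.2 hz'
        simp [hyk]; omega
      rw [List.flatMap_cons, insertBy_append_left _ _ _ _ hnot,
          ih g z hks.2 hz' (fun k hk => hg k (by simp [hk])), List.flatMap_cons]
      simp [hzk]

-- the stable sort by duration is the concatenation of the duration groups, taken in key order
theorem sorted_eq_grouped (ks : List Int) (hks : ks.Pairwise (· < ·)) :
    ∀ (ps : List (String × Int)), (∀ b ∈ ps, b.2 ∈ ks) →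
      PySem.List.sorted ps (fun b => b.2)
        = ks.flatMap (fun k => ps.filter (fun b => b.2 == k)) := by
  intro ps
  induction ps using List.reverseRecOn with
  | nil => intro _; simp [PySem.List.sorted]
  | append_singleton ps z ih =>
    intro hmem
    have hps : ∀ b ∈ ps, b.2 ∈ ks := fun b hb => hmem b (by simp [hb])
    have hz : z.2 ∈ ks := hmem z (by simp)
    rw [PySem.List.sorted_eq_foldl_insertBy, List.foldl_append, List.foldl_cons, List.foldl_nil,
        ← PySem.List.sorted_eq_foldl_insertBy, ih hps,
        insert_grouped ks _ z hks hz
          (fun k _ x hx => by simpa using (List.mem_filter.mp hx).2)]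
    apply flatMap_congr_mem
    intro k _
    simp [List.filter_append, List.filter_cons]

theorem courses_duration_eq (courses : List String) (durations : List Int) :
    courses_duration courses durations = courses_duration_alt courses durations := by
  unfold courses_duration courses_duration_alt
  simp only [sd_modify]
  show (((PySem.List.sorted
      ((PySem.List.enumerate (List.zip courses durations) 0).foldl
        (fun d p => d.modify p.2.2 [] (fun l => l ++ [p.1])) PySem.Dict.empty).items
      (fun p => p.1)).foldl
      (fun rd q => q.2.foldl
        (fun rd deep => match PySem.List.pyGet? (List.zip courses durations) deep with
          | some b => rd.insert b.1 q.1
          | none => rd) rd)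
      PySem.Dict.empty).items)
    = ((PySem.List.sorted (List.zip courses durations) (fun p => p.2)).foldl
        (fun result p => result.insert p.1 p.2) PySem.Dict.empty).items
  set ps := List.zip courses durations with hps
  set eps := PySem.List.enumerate ps 0 with heps
  set DD := eps.foldl (fun d p => d.modify p.2.2 [] (fun l => l ++ [p.1])) PySem.Dict.empty
    with hDDdef
  have hm : eps.map (fun p => p.2.2) = ps.map (fun b => b.2) := by
    calc eps.map (fun p => p.2.2)
        = (eps.map (fun x => x.2)).map (fun b => b.2) := (List.map_map).symm
      _ = ps.map (fun b => b.2) := by rw [enum_map_snd]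
  have hkeys : DD.keys = PySem.Set.ofList (ps.map (fun b => b.2)) := by
    calc DD.keys
        = PySem.Set.update PySem.Dict.empty.keys (eps.map (fun p => p.2.2)) :=
          PySem.Dict.keys_foldl_modify_key eps (fun p => p.2.2) ([] : List Int)
            (fun _ p l => l ++ [p.1]) PySem.Dict.empty
      _ = PySem.Set.ofList (eps.map (fun p => p.2.2)) := rfl
      _ = PySem.Set.ofList (ps.map (fun b => b.2)) := by rw [hm]
  have hnodup : DD.keys.Nodup :=
    PySem.Dict.nodup_keys_foldl_modify_key eps (fun p => p.2.2) ([] : List Int)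
      (fun _ p l => l ++ [p.1]) PySem.Dict.empty PySem.Dict.nodup_keys_empty
  have hG : ∀ k : Int, DD.getD k [] = (eps.filter (fun p => p.2.2 == k)).map (fun p => p.1) := by
    intro k
    have h := PySem.Dict.getD_foldl_modify_append (eps.map (fun p => ((p.2.2 : Int), p.1)))
      PySem.Dict.empty k
    rw [List.foldl_map, List.filter_map, List.map_map] at h
    calc DD.getD k []
        = PySem.Dict.empty.getD k [] ++ (eps.filter (fun p => p.2.2 == k)).map (fun p => p.1) := h
      _ = (eps.filter (fun p => p.2.2 == k)).map (fun p => p.1) := by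
          rw [PySem.Dict.getD_empty]; rfl
  have hitems : DD.items = DD.keys.map (fun k => (k, DD.getD k [])) :=
    PySem.Dict.items_eq_map_keys DD hnodup []
  have hpair : (PySem.List.sorted DD.keys (fun x => x)).Pairwise (· < ·) := by
    rw [hkeys]; exact PySem.List.sorted_ofList_pairwise_lt (ps.map (fun b => b.2))
  have hsorted : PySem.List.sorted DD.items (fun p => p.1)
      = (PySem.List.sorted DD.keys (fun x => x)).map (fun k => (k, DD.getD k [])) := by
    apply PySem.List.sorted_eq_of_perm_of_pairwise_lt
    · rw [hitems]
      exact (PySem.List.sorted_perm DD.keys (fun x => x) false).map _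
    · rw [List.pairwise_map]
      exact hpair
  have hf : ∀ k : Int, (eps.filter (fun p => p.2.2 == k)).map (fun p => p.2)
      = ps.filter (fun b => b.2 == k) := by
    intro k
    have h := List.filter_map (f := fun p : Int × String × Int => p.2)
      (p := fun b => b.2 == k) (l := eps)
    rw [show eps.map (fun p : Int × String × Int => p.2) = ps from enum_map_snd ps 0] at h
    exact h.symm
  have hstep : ∀ (acc : PySem.Dict String Int) (k : Int),
      (DD.getD k []).foldl
        (fun rd deep => match PySem.List.pyGet? ps deep with
          | some b => rd.insert b.1 k
          | none => rd) acc
      = (ps.filter (fun b => b.2 == k)).foldl (fun rd b => rd.insert b.1 b.2) acc := by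
    intro acc k
    calc (DD.getD k []).foldl
          (fun rd deep => match PySem.List.pyGet? ps deep with
            | some b => rd.insert b.1 k
            | none => rd) acc
        = ((eps.filter (fun p => p.2.2 == k)).map (fun p => p.1)).foldl
            (fun rd deep => match PySem.List.pyGet? ps deep with
              | some b => rd.insert b.1 k
              | none => rd) acc := by rw [hG k]
      _ = (eps.filter (fun p => p.2.2 == k)).foldl
            (fun rd p => match PySem.List.pyGet? ps p.1 with
              | some b => rd.insert b.1 k
              | none => rd) acc := List.foldl_map
      _ = (eps.filter (fun p => p.2.2 == k)).foldl
            (fun rd p => rd.insert p.2.1 p.2.2) acc := by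
          refine PySem.List.foldl_congr_mem _ _ _ _ ?_
          intro a p hp
          have hpe : p ∈ eps := (List.mem_filter.mp hp).1
          have hk : p.2.2 = k := by simpa using (List.mem_filter.mp hp).2
          rw [enum_pyGet ps p hpe, hk]
      _ = ((eps.filter (fun p => p.2.2 == k)).map (fun p => p.2)).foldl
            (fun rd b => rd.insert b.1 b.2) acc :=
          (List.foldl_map (f := fun p : Int × String × Int => p.2)
            (g := fun (rd : PySem.Dict String Int) (b : String × Int) => rd.insert b.1 b.2)
            (l := eps.filter (fun p => p.2.2 == k)) (init := acc)).symm
      _ = (ps.filter (fun b => b.2 == k)).foldl (fun rd b => rd.insert b.1 b.2) acc := by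
          rw [hf k]
  have hmem : ∀ b ∈ ps, b.2 ∈ PySem.List.sorted DD.keys (fun x => x) := by
    intro b hb
    rw [PySem.List.mem_sorted, hkeys, PySem.Set.mem_ofList]
    exact List.mem_map.mpr ⟨b, hb, rfl⟩
  refine congrArg PySem.Dict.items ?_
  calc (PySem.List.sorted DD.items (fun p => p.1)).foldl
        (fun rd q => q.2.foldl
          (fun rd deep => match PySem.List.pyGet? ps deep with
            | some b => rd.insert b.1 q.1
            | none => rd) rd)
        PySem.Dict.empty
      = ((PySem.List.sorted DD.keys (fun x => x)).map (fun k => (k, DD.getD k []))).foldl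
          (fun rd q => q.2.foldl
            (fun rd deep => match PySem.List.pyGet? ps deep with
              | some b => rd.insert b.1 q.1
              | none => rd) rd)
          PySem.Dict.empty := by rw [hsorted]
    _ = (PySem.List.sorted DD.keys (fun x => x)).foldl
          (fun rd k => (DD.getD k []).foldl
            (fun rd deep => match PySem.List.pyGet? ps deep with
              | some b => rd.insert b.1 k
              | none => rd) rd)
          PySem.Dict.empty := List.foldl_map
    _ = (PySem.List.sorted DD.keys (fun x => x)).foldl
          (fun rd k => (ps.filter (fun b => b.2 == k)).foldl
            (fun rd b => rd.insert b.1 b.2) rd)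
          PySem.Dict.empty :=
        PySem.List.foldl_congr_mem _ _ _ _ (fun acc k _ => hstep acc k)
    _ = ((PySem.List.sorted DD.keys (fun x => x)).flatMap
          (fun k => ps.filter (fun b => b.2 == k))).foldl
          (fun rd b => rd.insert b.1 b.2) PySem.Dict.empty :=
        foldl_foldl_flatMap _ _ _ _
    _ = (PySem.List.sorted ps (fun p => p.2)).foldl
          (fun rd b => rd.insert b.1 b.2) PySem.Dict.empty :=
        congrArg (fun l => l.foldl (fun (rd : PySem.Dict String Int) (b : String × Int) =>
            rd.insert b.1 b.2) PySem.Dict.empty)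
          (sorted_eq_grouped (PySem.List.sorted DD.keys (fun x => x)) hpair ps hmem).symm
-- ===== VERDICT (by name: the statement is the Claim_ definition above) =====
theorem courses_duration_spec : Claim_equal_courses_duration := by
  intro courses durations _
  exact courses_duration_eq courses durations
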